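-- pv_equiv track=rewrite | github.com/Global-Policy-Lab/gpl-covid | code/src/merge.py | get_policy_level
-- ===== SOURCE A (Python) =====
-- def get_policy_level(row):
--     # Assign policy_level to distinguish policies specified at different admin-unit levels
--     adm_levels = sorted(
--         [
--             int(col[3])
--             for col in row.keys()
--             if col.startswith("adm") and col.endswith("name")
--         ],
--         reverse=True,
--     )
--     for level in adm_levels:
--         if row[f"adm{level}_name"].lower() != "all":
--             return level
--     return 0
-- ===== SOURCE B (Python) =====
-- def get_policy_level(row):
--     # One pass: collect levels of adm*name keys whose value is not "all", take the max.
--     levels = [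
--         int(col[3])
--         for col, val in row.items()
--         if col.startswith("adm") and col.endswith("name") and val.lower() != "all"
--     ]
--     return max(levels) if levels else 0
-- ===== Notes on version B (the rewrite author's own statement) =====
-- stated objective: simpler
-- what changed: Replaces the descending sort plus first-hit scan (with a re-lookup of each reconstructed key) by a single comprehension that folds the non-'all' filter in and returns the max of the collected levels (0 if none).
-- outside the precondition, e.g. on get_policy_level({'adm1xname': 'hi', 'adm1_name': 'all'}): A returns 0, B returns 1; on get_policy_level({'adm1xname': 'hi'}): A raises KeyError, B returns 1
import Mathlib
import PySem

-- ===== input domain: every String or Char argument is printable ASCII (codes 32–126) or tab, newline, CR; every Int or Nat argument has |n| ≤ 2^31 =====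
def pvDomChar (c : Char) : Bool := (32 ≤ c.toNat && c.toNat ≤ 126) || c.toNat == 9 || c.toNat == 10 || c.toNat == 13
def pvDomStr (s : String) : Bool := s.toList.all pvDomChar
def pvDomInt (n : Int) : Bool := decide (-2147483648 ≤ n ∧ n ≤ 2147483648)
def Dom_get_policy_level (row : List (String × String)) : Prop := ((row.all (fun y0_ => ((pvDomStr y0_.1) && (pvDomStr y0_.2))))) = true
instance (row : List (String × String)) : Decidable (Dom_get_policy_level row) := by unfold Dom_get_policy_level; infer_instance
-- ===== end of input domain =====

-- B replaces A's descending sort + first-hit scan by one filtered pass taking the max; return values proved equal on Pre_.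


-- ===== PORT A =====
-- int(col[3]) : none (ValueError / IndexError) is replaced by 0 — those inputs are outside Pre_
def pvLevelOf (col : String) : Int :=
  ((PySem.Str.pyGet? col 3).bind (fun c => PySem.Int.ofChars? [c])).getD 0

-- col.startswith("adm") and col.endswith("name")
def pvAdmNameKey (col : String) : Bool :=
  PySem.Str.startswith col "adm" && PySem.Str.endswith col "name"

-- f"adm{level}_name"
def pvKeyOf (level : Int) : String :=
  String.ofList ("adm".toList ++ PySem.Int.toChars level ++ "_name".toList)

-- row[f"adm{level}_name"].lower() != "all"  (missing key = KeyError, outside Pre_; "" stands in)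
def pvTest (row : List (String × String)) (level : Int) : Bool :=
  PySem.Str.lower ((row.lookup (pvKeyOf level)).getD "") != "all"

-- the 'for level in adm_levels' loop with its early return
def pvScan (row : List (String × String)) : List Int → Int
  | [] => 0
  | level :: rest => if pvTest row level then level else pvScan row rest

def get_policy_level (row : List (String × String)) : Int :=
  let adm_levels :=
    PySem.List.sorted (((row.map Prod.fst).filter pvAdmNameKey).map pvLevelOf) (fun x => x) true
  pvScan row adm_levels

-- ===== PORT B =====
def get_policy_level_alt (row : List (String × String)) : Int :=
  let levels :=
    (row.filter (fun p =>
        PySem.Str.startswith p.1 "adm" && PySem.Str.endswith p.1 "name"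
          && (PySem.Str.lower p.2 != "all"))).map (fun p => pvLevelOf p.1)
  match PySem.List.max? levels (fun x => x) with
  | some m => m
  | none => 0

-- ===== PRECONDITION & SPEC =====
def pvAdmKeys : List String :=
  ["adm0_name","adm1_name","adm2_name","adm3_name","adm4_name",
   "adm5_name","adm6_name","adm7_name","adm8_name","adm9_name"]

-- Pre_ excludes rows with duplicate keys (impossible for a Python dict) and rows holding a key that
-- starts with "adm" and ends with "name" without being exactly "adm<digit>_name": on those A looks up
-- the reconstructed name f"adm{int(col[3])}_name", which raises KeyError or reads a different entry
-- than the key being scanned.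
def Pre_get_policy_level (row : List (String × String)) : Prop :=
  (row.map Prod.fst).Nodup ∧ ∀ p ∈ row, pvAdmNameKey p.1 = true → p.1 ∈ pvAdmKeys
instance (row : List (String × String)) : Decidable (Pre_get_policy_level row) := by
  unfold Pre_get_policy_level; infer_instance

def pvWitness_get_policy_level : (List (String × String)) :=
  [("adm1_name", "all"), ("adm2_name", "Town"), ("foo", "x")]

def Spec_get_policy_level (row : List (String × String)) (out : Int) : Prop := out = get_policy_level_alt row
instance (row : List (String × String)) (out : Int) : Decidable (Spec_get_policy_level row out) := by unfold Spec_get_policy_level; infer_instance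

-- ===== CLAIM (what is proved, stated in full; the proofs are below) =====
def Claim_equal_get_policy_level : Prop := ∀ (row : List (String × String)), Dom_get_policy_level row → Pre_get_policy_level row → Spec_get_policy_level row (get_policy_level row)

-- ===== LEMMAS AND PROOFS =====

-- reconstructing the key from the level gives back the key, for the ten canonical keys
lemma pvKeyOf_pvLevelOf {col : String} (h : col ∈ pvAdmKeys) : pvKeyOf (pvLevelOf col) = col := by
  fin_cases h <;> decide

-- first-match lookup of a present key under distinct keys
lemma pvLookup_eq_some {row : List (String × String)} {p : String × String}
    (hnd : (row.map Prod.fst).Nodup) (hp : p ∈ row) : row.lookup p.1 = some p.2 := by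
  induction row with
  | nil => cases hp
  | cons q rest ih =>
    simp only [List.map_cons, List.nodup_cons] at hnd
    rcases List.mem_cons.mp hp with rfl | hmem
    · simp [List.lookup]
    · have hne : (p.1 == q.1) = false :=
        beq_eq_false_iff_ne.mpr (fun he => hnd.1 (he ▸ List.mem_map_of_mem hmem))
      simp [List.lookup, hne, ih hnd.2 hmem]

lemma pvTest_eq {row : List (String × String)} {p : String × String}
    (hnd : (row.map Prod.fst).Nodup) (hcanon : p.1 ∈ pvAdmKeys) (hp : p ∈ row) :
    pvTest row (pvLevelOf p.1) = (PySem.Str.lower p.2 != "all") := by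
  simp [pvTest, pvKeyOf_pvLevelOf hcanon, pvLookup_eq_some hnd hp]

-- scanning a descending list for the first passing element is the max of the passing elements
lemma pvScan_eq_max (row : List (String × String)) (S : List Int)
    (h : S.Pairwise (fun a b => b ≤ a)) :
    pvScan row S =
      (match PySem.List.max? (S.filter (pvTest row)) (fun x => x) with
       | some m => m
       | none => 0) := by
  induction S with
  | nil => simp [pvScan, PySem.List.max?]
  | cons x t ih =>
    rcases List.pairwise_cons.mp h with ⟨hx, ht⟩
    by_cases hpx : pvTest row x
    · simp only [pvScan, hpx, if_true, List.filter_cons]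
      rcases hm : PySem.List.max? (x :: t.filter (pvTest row)) (fun x => x) with _ | m
      · exact absurd ((PySem.List.max?_eq_none_iff _ _).mp hm) (by simp)
      · have hmem := PySem.List.max?_mem hm
        have hle : x ≤ m := PySem.List.max?_isMax hm x (List.mem_cons_self ..)
        have hge : m ≤ x := by
          rcases List.mem_cons.mp hmem with rfl | hmt
          · exact le_refl m
          · exact hx m (List.mem_of_mem_filter hmt)
        exact le_antisymm hle hge
    · simp only [pvScan, hpx, List.filter_cons]
      exact (ih ht)

-- max over Int with the identity key only depends on the multiset of elements
lemma pvMax?_perm {xs ys : List Int} (h : xs.Perm ys) :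
    PySem.List.max? xs (fun x => x) = PySem.List.max? ys (fun x => x) := by
  rcases hx : PySem.List.max? xs (fun x => x) with _ | m <;>
    rcases hy : PySem.List.max? ys (fun x => x) with _ | m'
  · rfl
  · obtain rfl : xs = [] := (PySem.List.max?_eq_none_iff _ _).mp hx
    obtain rfl : ys = [] := h.symm.eq_nil
    simp [PySem.List.max?] at hy
  · obtain rfl : ys = [] := (PySem.List.max?_eq_none_iff _ _).mp hy
    obtain rfl : xs = [] := h.eq_nil
    simp [PySem.List.max?] at hx
  · have h1 : m ≤ m' := PySem.List.max?_isMax hy m (h.mem_iff.mp (PySem.List.max?_mem hx))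
    have h2 : m' ≤ m := PySem.List.max?_isMax hx m' (h.mem_iff.mpr (PySem.List.max?_mem hy))
    rw [le_antisymm h1 h2]

-- B's comprehension is the pvTest-filter of A's unsorted level list
lemma pvLists_eq_aux {row : List (String × String)}
    (hnd : (row.map Prod.fst).Nodup)
    (hcanon : ∀ p ∈ row, pvAdmNameKey p.1 = true → p.1 ∈ pvAdmKeys)
    (l : List (String × String)) (hsub : ∀ p ∈ l, p ∈ row) :
    (((l.map Prod.fst).filter pvAdmNameKey).map pvLevelOf).filter (pvTest row)
      = (l.filter (fun p => pvAdmNameKey p.1 && (PySem.Str.lower p.2 != "all"))).map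
          (fun p => pvLevelOf p.1) := by
  induction l with
  | nil => simp
  | cons q rest ih =>
    have hq : q ∈ row := hsub q (List.mem_cons_self ..)
    have ih' := ih (fun p hp => hsub p (List.mem_cons_of_mem _ hp))
    by_cases hk : pvAdmNameKey q.1 = true
    · have ht := pvTest_eq hnd (hcanon q hq hk) hq
      by_cases hv : (PySem.Str.lower q.2 != "all") = true
      · simp only [List.map_cons, List.filter_cons, hk, hv, ht, if_true, Bool.and_self]
        simp [ih']
      · have hv' : (PySem.Str.lower q.2 != "all") = false := by simpa using hv
        simp only [List.map_cons, List.filter_cons, hk, hv', ht, if_true, Bool.and_false]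
        simp [ih']
    · have hk' : pvAdmNameKey q.1 = false := by simpa using hk
      simp only [List.map_cons, List.filter_cons, hk', Bool.false_and]
      simp [ih']

-- ===== VERDICT (by name: the statement is the Claim_ definition above) =====
theorem get_policy_level_spec : Claim_equal_get_policy_level := by
  intro row _ hpre
  rcases hpre with ⟨hnd, hcanon⟩
  unfold Spec_get_policy_level get_policy_level get_policy_level_alt
  rw [pvScan_eq_max row _ (PySem.List.sorted_pairwise_rev ..)]
  rw [pvMax?_perm ((PySem.List.sorted_perm ..).filter (pvTest row))]
  rw [pvLists_eq_aux hnd hcanon row (fun p hp => hp)]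
  have hpred : row.filter (fun p => pvAdmNameKey p.1 && (PySem.Str.lower p.2 != "all"))
      = row.filter (fun p =>
          PySem.Str.startswith p.1 "adm" && PySem.Str.endswith p.1 "name"
            && (PySem.Str.lower p.2 != "all")) :=
    List.filter_congr (fun p _ => by simp [pvAdmNameKey, Bool.and_assoc])
  rw [hpred]
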